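-- pv_equiv track=rewrite | github.com/ReciHub/FunnyAlgorithms | Patterns/peano_curve.py | cordinate
-- ===== SOURCE A (Python) =====
-- def cordinate(h):
--     l=[(1,1)]
--     x=1
--     y=1
--     for i in range (len(h)):
--         if h[i]=='D':
--             x+=1
--         elif h[i]=='R':
--             y+=1
--         elif h[i]=='U':
--             x-=1
--         elif h[i]=='L':
--             y-=1
--         l.append((x,y))
--     return(l)
-- ===== SOURCE B (Python) =====
-- def cordinate(h):
--     # x and y evolve independently: build each axis as its own prefix-sum
--     # track over the whole string, then zip the tracks into points.
--     xs = [1]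
--     for c in h:
--         xs.append(xs[-1] + (c == 'D') - (c == 'U'))
--     ys = [1]
--     for c in h:
--         ys.append(ys[-1] + (c == 'R') - (c == 'L'))
--     return list(zip(xs, ys))
-- ===== Notes on version B (the rewrite author's own statement) =====
-- stated objective: alternative
-- what changed: B splits the problem by axis: two independent staged passes build the x-track and y-track as prefix sums of boolean-arithmetic deltas, and the point list is their zip, instead of A's single loop mutating an (x,y) pair and appending.
import Mathlib
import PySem

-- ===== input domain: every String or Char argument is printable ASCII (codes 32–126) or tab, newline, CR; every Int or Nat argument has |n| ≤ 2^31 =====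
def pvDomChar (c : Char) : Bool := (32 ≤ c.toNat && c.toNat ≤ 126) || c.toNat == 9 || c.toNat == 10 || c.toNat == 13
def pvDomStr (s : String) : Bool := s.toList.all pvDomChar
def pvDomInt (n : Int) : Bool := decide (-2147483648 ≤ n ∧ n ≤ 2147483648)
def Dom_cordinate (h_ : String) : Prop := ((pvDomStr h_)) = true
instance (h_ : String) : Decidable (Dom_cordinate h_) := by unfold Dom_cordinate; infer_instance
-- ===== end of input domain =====

-- B splits the trace by axis: two staged prefix-sum passes (x-track, y-track) zipped into points, instead of A's single mutate-and-append loop over pairs (objective: alternative decomposition).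

-- ===== PORT A =====
def cordinate (h_ : String) : List (Int × Int) :=
  (h_.toList.foldl
    (fun (s : List (Int × Int) × Int × Int) c =>
      let x := s.2.1
      let y := s.2.2
      let xy : Int × Int :=
        if c = 'D' then (x + 1, y)
        else if c = 'R' then (x, y + 1)
        else if c = 'U' then (x - 1, y)
        else if c = 'L' then (x, y - 1)
        else (x, y)
      (s.1 ++ [xy], xy))
    ([(1, 1)], 1, 1)).1

-- ===== PORT B =====
-- axis pass: append last + (c == a) - (c == b), exactly Source B's loops
def pvAxis (a b : Char) (cs : List Char) : List Int :=
  cs.foldl (fun t c =>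
    t ++ [t.getLast! + ((if c = a then (1:Int) else 0) - (if c = b then (1:Int) else 0))]) [1]

def cordinate_alt (h_ : String) : List (Int × Int) :=
  (pvAxis 'D' 'U' h_.toList).zip (pvAxis 'R' 'L' h_.toList)

-- ===== PRECONDITION & SPEC =====
def Spec_cordinate (h_ : String) (out : List (Int × Int)) : Prop := out = cordinate_alt h_
instance (h_ : String) (out : List (Int × Int)) : Decidable (Spec_cordinate h_ out) := by unfold Spec_cordinate; infer_instance

-- ===== CLAIM (what is proved, stated in full; the proofs are below) =====
def Claim_equal_cordinate : Prop := ∀ (h_ : String), Dom_cordinate h_ → Spec_cordinate h_ (cordinate h_)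

-- ===== LEMMAS AND PROOFS =====

-- the per-character delta of each axis
def pvD (a b : Char) (c : Char) : Int :=
  (if c = a then (1:Int) else 0) - (if c = b then (1:Int) else 0)

theorem pvD_def (a b c : Char) :
    ((if c = a then (1:Int) else 0) - (if c = b then (1:Int) else 0)) = pvD a b c := rfl

theorem pv_getLast!_concat (l : List Int) (w : Int) : (l ++ [w]).getLast! = w := by
  induction l with
  | nil => rfl
  | cons x xs ih => cases xs <;> simp_all [List.getLast!]

-- A's fold equals acc ++ tail of the paired scanl
theorem pv_keyA (cs : List Char) :
    ∀ (acc : List (Int × Int)) (p : Int × Int),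
      (cs.foldl
        (fun (s : List (Int × Int) × Int × Int) c =>
          let x := s.2.1
          let y := s.2.2
          let xy : Int × Int :=
            if c = 'D' then (x + 1, y)
            else if c = 'R' then (x, y + 1)
            else if c = 'U' then (x - 1, y)
            else if c = 'L' then (x, y - 1)
            else (x, y)
          (s.1 ++ [xy], xy))
        (acc, p)).1
      = acc ++ (List.scanl (fun (p : Int × Int) c => (p.1 + pvD 'D' 'U' c, p.2 + pvD 'R' 'L' c)) p cs).tail := by
  induction cs with
  | nil => intro acc p; simp
  | cons c cs ih =>
    intro acc p
    have hstep :
        (if c = 'D' then (p.1 + 1, p.2)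
         else if c = 'R' then (p.1, p.2 + 1)
         else if c = 'U' then (p.1 - 1, p.2)
         else if c = 'L' then (p.1, p.2 - 1)
         else (p.1, p.2))
        = (p.1 + pvD 'D' 'U' c, p.2 + pvD 'R' 'L' c) := by
      unfold pvD
      split_ifs <;> simp_all <;> ring
    have hsc : ∀ (b : Int × Int) (l : List Char),
        List.scanl (fun (p : Int × Int) c => (p.1 + pvD 'D' 'U' c, p.2 + pvD 'R' 'L' c)) b l
          = b :: (List.scanl (fun (p : Int × Int) c => (p.1 + pvD 'D' 'U' c, p.2 + pvD 'R' 'L' c)) b l).tail := by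
      intro b l; cases l <;> simp [List.scanl]
    simp only [List.foldl_cons, List.scanl_cons, List.tail_cons]
    rw [ih, hstep, hsc]
    simp

-- B's axis fold equals acc ++ tail of the scalar scanl, when acc ends in v
theorem pv_keyAxis (a b : Char) (cs : List Char) :
    ∀ (acc : List Int) (v : Int), acc ≠ [] → acc.getLast! = v →
      cs.foldl (fun t c =>
        t ++ [t.getLast! + ((if c = a then (1:Int) else 0) - (if c = b then (1:Int) else 0))]) acc
      = acc ++ (List.scanl (fun x c => x + pvD a b c) v cs).tail := by
  induction cs with
  | nil => intro acc v _ _; simp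
  | cons c cs ih =>
    intro acc v hne hv
    simp only [pvD_def] at ih ⊢
    have hsc : ∀ (w : Int) (l : List Char),
        List.scanl (fun x c => x + pvD a b c) w l
          = w :: (List.scanl (fun x c => x + pvD a b c) w l).tail := by
      intro w l; cases l <;> simp [List.scanl]
    simp only [List.foldl_cons, List.scanl_cons, List.tail_cons]
    rw [hv, ih (acc ++ [v + pvD a b c]) (v + pvD a b c)
          (by simp) (pv_getLast!_concat acc _), hsc (v + pvD a b c) cs]
    simp

-- zip of two scanls is the paired scanl
theorem pv_zip_scanl (cs : List Char) :
    ∀ (x y : Int),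
      (List.scanl (fun x c => x + pvD 'D' 'U' c) x cs).zip
        (List.scanl (fun y c => y + pvD 'R' 'L' c) y cs)
      = List.scanl (fun (p : Int × Int) c => (p.1 + pvD 'D' 'U' c, p.2 + pvD 'R' 'L' c)) (x, y) cs := by
  induction cs with
  | nil => intro x y; simp [List.scanl]
  | cons c cs ih =>
    intro x y
    simp only [List.scanl_cons, List.zip_cons_cons]
    rw [ih]

-- ===== VERDICT (by name: the statement is the Claim_ definition above) =====
theorem cordinate_spec : Claim_equal_cordinate := by
  intro h_ _
  show cordinate h_ = cordinate_alt h_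
  unfold cordinate cordinate_alt pvAxis
  rw [pv_keyA,
      pv_keyAxis 'D' 'U' h_.toList [1] 1 (by simp) (by simp),
      pv_keyAxis 'R' 'L' h_.toList [1] 1 (by simp) (by simp)]
  cases hl : h_.toList with
  | nil => simp
  | cons c cs =>
    simp only [List.scanl_cons, List.tail_cons]
    rw [← pv_zip_scanl cs]
    rfl
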